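-- pv_equiv track=rewrite | github.com/nidepapa/algorithm-notebook | new.py | findMaximumSustainableClusterSize
-- ===== SOURCE A (Python) =====
-- import collections
--
-- def findMaximumSustainableClusterSize(bootingPower, processingPower, powerMax):
--     res = 0
--     prefix = [0] * len(processingPower)
--     prefix[0] = processingPower[0]
--     q = collections.deque()
--
--     for i in range(1, len(prefix)):
--         prefix[i] = prefix[i - 1] + processingPower[i]
--
--     hh = 0
--     for tt in range(len(bootingPower)):
--         while q and q[0] < hh:
--             q.popleft()
--         while q and bootingPower[q[-1]] <= bootingPower[tt]:
--             q.pop()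
--         q.append(tt)
--         if bootingPower[q[0]] + (prefix[tt] - prefix[hh] + processingPower[hh]) * (tt - hh + 1) <= powerMax:
--             res = max(res, tt - hh + 1)
--         else:
--             hh += 1
--     return res
-- ===== SOURCE B (Python) =====
-- def findMaximumSustainableClusterSize(bootingPower, processingPower, powerMax):
--     res = 0
--     hh = 0
--     for tt in range(len(bootingPower)):
--         if max(bootingPower[hh:tt + 1]) + sum(processingPower[hh:tt + 1]) * (tt - hh + 1) <= powerMax:
--             res = max(res, tt - hh + 1)
--         else:
--             hh += 1
--     return res
-- ===== Notes on version B (the rewrite author's own statement) =====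
-- stated objective: simpler
-- what changed: The monotonic deque and the precomputed prefix-sum array are removed entirely: B recomputes the window maximum and window sum directly from slices bootingPower[hh:tt+1] / processingPower[hh:tt+1] inside the same single forward scan, so the whole deque-maintenance machinery (front pops, back pops, prefix table) disappears.
import Mathlib
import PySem

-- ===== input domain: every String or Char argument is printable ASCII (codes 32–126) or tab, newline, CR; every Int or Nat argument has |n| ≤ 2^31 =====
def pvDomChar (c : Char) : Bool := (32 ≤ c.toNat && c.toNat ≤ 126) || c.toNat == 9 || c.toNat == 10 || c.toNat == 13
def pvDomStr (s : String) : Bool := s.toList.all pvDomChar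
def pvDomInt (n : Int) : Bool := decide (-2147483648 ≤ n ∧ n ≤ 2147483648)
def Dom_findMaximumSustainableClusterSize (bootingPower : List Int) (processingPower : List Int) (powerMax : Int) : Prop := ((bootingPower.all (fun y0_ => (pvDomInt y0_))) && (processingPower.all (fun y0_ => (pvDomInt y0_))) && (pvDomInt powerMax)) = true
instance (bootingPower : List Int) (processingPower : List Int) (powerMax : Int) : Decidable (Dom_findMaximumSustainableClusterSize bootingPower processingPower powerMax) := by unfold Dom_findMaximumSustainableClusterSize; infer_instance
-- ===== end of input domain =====

-- B drops A's monotonic deque and prefix-sum array: the same single scan recomputes the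
-- window max and window sum from slices; simpler (O(n^2) instead of O(n), no speed claim).

-- ===== PORT A =====
-- deque ported as a list of Nat indices, front at the head; each while-pop loop is a dropWhile
-- (from the front directly, from the back via reverse); prefix[] is built by the same
-- left-to-right recurrence.  Out-of-range indexing (only reachable outside Pre_) uses default 0.
def findMaximumSustainableClusterSize (bootingPower : List Int) (processingPower : List Int) (powerMax : Int) : Int :=
  let pref : List Int :=
    (List.range' 1 (processingPower.length - 1)).foldl
      (fun acc (i : Nat) => acc ++ [acc.getLast?.getD 0 + PySem.List.pyGetD processingPower (i : Int) 0])
      [PySem.List.pyGetD processingPower 0 0]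
  (((List.range bootingPower.length).foldl
    (fun (s : Int × Nat × List Nat) (tt : Nat) =>
      let res := s.1
      let hh := s.2.1
      let q1 := s.2.2.dropWhile (fun j => j < hh)
      let q2 := (q1.reverse.dropWhile (fun (j : Nat) =>
        PySem.List.pyGetD bootingPower (j : Int) 0 ≤ PySem.List.pyGetD bootingPower (tt : Int) 0)).reverse
      let q := q2 ++ [tt]
      if PySem.List.pyGetD bootingPower (Int.ofNat (q.headD 0)) 0 +
           (PySem.List.pyGetD pref (tt : Int) 0 - PySem.List.pyGetD pref (hh : Int) 0 +
             PySem.List.pyGetD processingPower (hh : Int) 0) * ((tt : Int) - hh + 1) ≤ powerMax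
      then (max res ((tt : Int) - hh + 1), hh, q)
      else (res, hh + 1, q))
    ((0 : Int), (0 : Nat), ([] : List Nat))).1)

-- ===== PORT B =====
def findMaximumSustainableClusterSize_alt (bootingPower : List Int) (processingPower : List Int) (powerMax : Int) : Int :=
  (((List.range bootingPower.length).foldl
    (fun (s : Int × Nat) (tt : Nat) =>
      let res := s.1
      let hh := s.2
      if (PySem.List.max? (PySem.List.slice bootingPower (some (hh : Int)) (some ((tt : Int) + 1))) (fun x => x)).getD 0 +
           (PySem.List.slice processingPower (some (hh : Int)) (some ((tt : Int) + 1))).sum * ((tt : Int) - hh + 1) ≤ powerMax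
      then (max res ((tt : Int) - hh + 1), hh)
      else (res, hh + 1))
    ((0 : Int), (0 : Nat))).1)

-- ===== PRECONDITION & SPEC =====
-- Pre_ is exactly A's return domain: A raises IndexError iff processingPower is empty
-- (prefix[0] = processingPower[0]) or shorter than bootingPower (prefix[tt]).
def Pre_findMaximumSustainableClusterSize (bootingPower : List Int) (processingPower : List Int) (powerMax : Int) : Prop :=
  processingPower ≠ [] ∧ bootingPower.length ≤ processingPower.length
instance (bootingPower : List Int) (processingPower : List Int) (powerMax : Int) : Decidable (Pre_findMaximumSustainableClusterSize bootingPower processingPower powerMax) := by unfold Pre_findMaximumSustainableClusterSize; infer_instance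
def pvWitness_findMaximumSustainableClusterSize : List Int × List Int × Int := ([3, 1, 2], [1, 1, 1, 1], 10)

def Spec_findMaximumSustainableClusterSize (bootingPower : List Int) (processingPower : List Int) (powerMax : Int) (out : Int) : Prop := out = findMaximumSustainableClusterSize_alt bootingPower processingPower powerMax
instance (bootingPower : List Int) (processingPower : List Int) (powerMax : Int) (out : Int) : Decidable (Spec_findMaximumSustainableClusterSize bootingPower processingPower powerMax out) := by unfold Spec_findMaximumSustainableClusterSize; infer_instance

-- ===== CLAIM (what is proved, stated in full; the proofs are below) =====
def Claim_equal_findMaximumSustainableClusterSize : Prop := ∀ (bootingPower : List Int) (processingPower : List Int) (powerMax : Int), Dom_findMaximumSustainableClusterSize bootingPower processingPower powerMax → Pre_findMaximumSustainableClusterSize bootingPower processingPower powerMax → Spec_findMaximumSustainableClusterSize bootingPower processingPower powerMax (findMaximumSustainableClusterSize bootingPower processingPower powerMax)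

-- ===== LEMMAS AND PROOFS =====

-- shorthand used only by the proofs
def pvg (boot : List Int) (j : Nat) : Int := boot.getD j 0

-- pvGood boot t j : j survives the back-pops after indices < t have been processed
def pvGood (boot : List Int) (t j : Nat) : Bool :=
  (List.range' (j + 1) (t - (j + 1))).all (fun k => decide (pvg boot k < pvg boot j))

-- pvG boot hh t : the deque contents after processing indices 0..t-1 with head pointer hh
def pvG (boot : List Int) (hh t : Nat) : List Nat :=
  (List.range' hh (t - hh)).filter (fun j => pvGood boot t j)

lemma pvGood_iff (boot : List Int) (t j : Nat) :
    pvGood boot t j = true ↔ ∀ k, j < k → k < t → pvg boot k < pvg boot j := by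
  unfold pvGood
  rw [List.all_eq_true]
  constructor
  · intro h k hk1 hk2
    have : k ∈ List.range' (j + 1) (t - (j + 1)) := by
      rw [List.mem_range'_1]; omega
    simpa using h k this
  · intro h k hk
    rw [List.mem_range'_1] at hk
    simpa using h k (by omega) (by omega)

lemma mem_pvG (boot : List Int) (hh t j : Nat) :
    j ∈ pvG boot hh t ↔ hh ≤ j ∧ j < t ∧ ∀ k, j < k → k < t → pvg boot k < pvg boot j := by
  unfold pvG
  rw [List.mem_filter, List.mem_range'_1, pvGood_iff]
  constructor
  · rintro ⟨⟨h1, h2⟩, h3⟩; exact ⟨h1, by omega, h3⟩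
  · rintro ⟨h1, h2, h3⟩; exact ⟨⟨h1, by omega⟩, h3⟩

lemma pvG_pairwise_lt (boot : List Int) (hh t : Nat) : (pvG boot hh t).Pairwise (· < ·) :=
  (List.pairwise_lt_range' ..).filter _

lemma pvG_pairwise_val (boot : List Int) (hh t : Nat) :
    (pvG boot hh t).Pairwise (fun a b => pvg boot b < pvg boot a) := by
  refine List.Pairwise.imp_of_mem ?_ (pvG_pairwise_lt boot hh t)
  intro a b ha hb hab
  rw [mem_pvG] at ha hb
  exact ha.2.2 b hab hb.2.1

lemma dropWhile_eq_nil_of_all {α : Type} (p : α → Bool) (l : List α)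
    (h : ∀ x ∈ l, p x = true) : l.dropWhile p = [] := by
  induction l with
  | nil => rfl
  | cons a l ih =>
    rw [List.dropWhile_cons, h a (List.mem_cons_self ..)]
    exact ih (fun x hx => h x (List.mem_cons_of_mem _ hx))

lemma dropWhile_eq_self_of_all {α : Type} (p : α → Bool) (l : List α)
    (h : ∀ x ∈ l, p x = false) : l.dropWhile p = l := by
  cases l with
  | nil => rfl
  | cons a l => rw [List.dropWhile_cons, h a (List.mem_cons_self ..)]; rfl

-- the front-pop loop: dropping indices < hh' from the deque moves the head pointer
lemma pvG_dropWhile (boot : List Int) (hh hh' t : Nat) (h : hh ≤ hh') :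
    (pvG boot hh t).dropWhile (fun j => j < hh') = pvG boot hh' t := by
  by_cases ht : t ≤ hh'
  · have h1 : pvG boot hh' t = [] := by
      unfold pvG
      have : t - hh' = 0 := by omega
      rw [this]; rfl
    rw [h1]
    apply dropWhile_eq_nil_of_all
    intro x hx
    rw [mem_pvG] at hx
    simpa using by omega
  · push_neg at ht
    by_cases hht : hh ≤ t
    · have hsplit : List.range' hh (t - hh) = List.range' hh (hh' - hh) ++ List.range' hh' (t - hh') := by
        have h2 := List.range'_append (s := hh) (m := hh' - hh) (n := t - hh') (step := 1)
        simp only [one_mul] at h2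
        rw [show hh + (hh' - hh) = hh' by omega] at h2
        rw [show hh' - hh + (t - hh') = t - hh by omega] at h2
        exact h2.symm
      unfold pvG
      rw [hsplit, List.filter_append, List.dropWhile_append]
      have h1 : (List.filter (fun j => pvGood boot t j) (List.range' hh (hh' - hh))).dropWhile (fun j => decide (j < hh')) = [] := by
        apply dropWhile_eq_nil_of_all
        intro x hx
        have := List.mem_range'_1.mp (List.mem_of_mem_filter hx)
        simpa using by omega
      rw [h1]
      simp only [List.isEmpty_nil, if_true]
      apply dropWhile_eq_self_of_all
      intro x hx
      have := List.mem_range'_1.mp (List.mem_of_mem_filter hx)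
      simpa using by omega
    · have h0 : pvG boot hh t = [] := by
        unfold pvG
        have : t - hh = 0 := by omega
        rw [this]; rfl
      omega
-- (the final omega above is unreachable: hh ≤ hh' < t contradicts t < hh)

-- the back-pop loop on a value-decreasing list keeps exactly the strictly-greater prefix
lemma popback_eq_filter {α : Type} (l : List α) (q p : α → Bool) (hq : ∀ j, q j = !p j)
    (hpair : l.Pairwise (fun a b => p b = true → p a = true)) :
    (l.reverse.dropWhile q).reverse = l.filter p := by
  induction l using List.reverseRecOn with
  | nil => rfl
  | append_singleton xs a ih =>
    rw [List.pairwise_append] at hpair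
    rw [List.reverse_append, List.reverse_singleton, List.singleton_append, List.dropWhile_cons]
    by_cases hpa : p a = true
    · rw [hq a, hpa]
      simp only [Bool.not_true, Bool.false_eq_true, if_false]
      rw [List.reverse_cons, List.reverse_reverse, List.filter_append]
      have : xs.filter p = xs := by
        apply List.filter_eq_self.mpr
        intro x hx
        exact hpair.2.2 x hx a (List.mem_singleton_self a) hpa
      rw [this]
      simp [hpa]
    · rw [hq a]
      have hpa' : p a = false := by simpa using hpa
      rw [hpa']
      simp only [Bool.not_false, if_true]
      rw [ih hpair.1, List.filter_append]
      simp [hpa']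

-- one whole deque-maintenance step: back-pops then append t
lemma pvG_step (boot : List Int) (hh t : Nat) (h : hh ≤ t) :
    ((pvG boot hh t).reverse.dropWhile (fun j => decide (pvg boot j ≤ pvg boot t))).reverse ++ [t]
      = pvG boot hh (t + 1) := by
  have hpop : ((pvG boot hh t).reverse.dropWhile (fun j => decide (pvg boot j ≤ pvg boot t))).reverse
      = (pvG boot hh t).filter (fun j => decide (pvg boot t < pvg boot j)) := by
    apply popback_eq_filter
    · intro j
      rcases lt_or_ge (pvg boot t) (pvg boot j) with hc | hc
      · simp [hc, not_le.mpr hc]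
      · simp [not_lt.mpr hc, hc]
    · refine List.Pairwise.imp_of_mem ?_ (pvG_pairwise_val boot hh t)
      intro a b _ _ hab hb
      simp only [decide_eq_true_eq] at hb ⊢
      exact lt_trans hb hab
  rw [hpop]
  unfold pvG
  have hsplit : List.range' hh (t + 1 - hh) = List.range' hh (t - hh) ++ [t] := by
    rw [show t + 1 - hh = (t - hh) + 1 by omega, List.range'_concat]
    simp only [one_mul]
    rw [show hh + (t - hh) = t by omega]
  rw [hsplit, List.filter_append]
  have hgt : pvGood boot (t + 1) t = true := by
    rw [pvGood_iff]; intro k h1 h2; omega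
  have hfe : (List.range' hh (t - hh)).filter (fun j => pvGood boot (t + 1) j)
      = ((List.range' hh (t - hh)).filter (fun j => pvGood boot t j)).filter
          (fun j => decide (pvg boot t < pvg boot j)) := by
    rw [List.filter_filter]
    apply List.filter_congr
    intro j hj
    have hjt : j < t := by have := List.mem_range'_1.mp hj; omega
    rw [Bool.eq_iff_iff, Bool.and_eq_true, pvGood_iff, pvGood_iff, decide_eq_true_eq]
    constructor
    · intro hall
      exact ⟨hall t hjt (by omega), fun k h1 h2 => hall k h1 (by omega)⟩
    · rintro ⟨hd, hall⟩ k h1 h2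
      rcases Nat.lt_or_ge k t with hk | hk
      · exact hall k h1 hk
      · have hkt : k = t := by omega
        rw [hkt]; exact hd
  rw [hfe]
  simp [hgt]

-- head of the deque is the window maximum (as computed by B's slice-max)
lemma pvG_head_max (boot : List Int) (hh t : Nat) (hht : hh ≤ t) (htl : t < boot.length) :
    pvg boot ((pvG boot hh (t + 1)).headD 0)
      = (PySem.List.max? (PySem.List.slice boot (some (hh : Int)) (some ((t : Int) + 1))) (fun x => x)).getD 0 := by
  have hpvg : ∀ (k : Nat) (h : k < boot.length), pvg boot k = boot[k] :=
    fun k h => List.getD_eq_getElem boot 0 h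
  have htmem : t ∈ pvG boot hh (t + 1) := by
    rw [mem_pvG]; exact ⟨hht, by omega, fun k h1 h2 => by omega⟩
  obtain ⟨a, l, hL⟩ : ∃ a l, pvG boot hh (t + 1) = a :: l := by
    cases hpv : pvG boot hh (t + 1) with
    | nil => rw [hpv] at htmem; cases htmem
    | cons a l => exact ⟨a, l, rfl⟩
  have hhead : (pvG boot hh (t + 1)).headD 0 = a := by rw [hL]; rfl
  have hamem : a ∈ pvG boot hh (t + 1) := by rw [hL]; exact List.mem_cons_self ..
  have hmin : ∀ k ∈ pvG boot hh (t + 1), a ≤ k := by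
    intro k hk
    rw [hL] at hk
    rcases List.mem_cons.mp hk with h | h
    · omega
    · have := List.rel_of_pairwise_cons (hL ▸ pvG_pairwise_lt boot hh (t + 1)) h; omega
  rw [mem_pvG] at hamem
  obtain ⟨ha1, ha2, hgood⟩ := hamem
  have hdom : ∀ d k, hh ≤ k → k ≤ t → t - k ≤ d → pvg boot k ≤ pvg boot a := by
    intro d
    induction d with
    | zero =>
      intro k h1 h2 h3
      have hkt : k = t := by omega
      subst hkt
      rcases Nat.eq_or_lt_of_le (hmin k htmem) with he | hl2
      · rw [← he]
      · exact le_of_lt (hgood k hl2 (by omega))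
    | succ d ihd =>
      intro k h1 h2 h3
      by_cases hk : k ∈ pvG boot hh (t + 1)
      · rcases Nat.eq_or_lt_of_le (hmin k hk) with he | hl2
        · rw [← he]
        · exact le_of_lt (hgood k hl2 (by omega))
      · rw [mem_pvG] at hk
        push_neg at hk
        obtain ⟨k', hk1, hk2, hk3⟩ := hk h1 (by omega)
        exact le_trans hk3 (ihd k' (by omega) (by omega) (by omega))
  have hdomall : ∀ k, hh ≤ k → k ≤ t → pvg boot k ≤ pvg boot a :=
    fun k h1 h2 => hdom (t - k) k h1 h2 le_rfl
  have hcast : ((t : Int) + 1) = ((t + 1 : Nat) : Int) := by push_cast; ring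
  rw [hcast, PySem.List.slice_natCast]
  have hwlen : ((boot.drop hh).take (t + 1 - hh)).length = t + 1 - hh := by
    rw [List.length_take, List.length_drop]; omega
  have hwget : ∀ i (h : i < ((boot.drop hh).take (t + 1 - hh)).length),
      ((boot.drop hh).take (t + 1 - hh))[i] = boot[hh + i]'(by rw [hwlen] at h; omega) := by
    intro i h
    rw [List.getElem_take, List.getElem_drop]
  have hwa : pvg boot a ∈ (boot.drop hh).take (t + 1 - hh) := by
    have hia : a - hh < ((boot.drop hh).take (t + 1 - hh)).length := by rw [hwlen]; omega
    have h2 := hwget (a - hh) hia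
    rw [hpvg a (by omega)]
    have h3 : boot[a] = ((boot.drop hh).take (t + 1 - hh))[a - hh] := by
      rw [h2]
      congr 1
      omega
    rw [h3]
    exact List.getElem_mem _
  have hwub : ∀ y ∈ (boot.drop hh).take (t + 1 - hh), y ≤ pvg boot a := by
    intro y hy
    obtain ⟨i, hi, hyi⟩ := List.getElem_of_mem hy
    rw [← hyi, hwget i hi, ← hpvg (hh + i) (by rw [hwlen] at hi; omega)]
    exact hdomall (hh + i) (by omega) (by rw [hwlen] at hi; omega)
  obtain ⟨m, hm⟩ : ∃ m, PySem.List.max? ((boot.drop hh).take (t + 1 - hh)) (fun x => x) = some m := by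
    cases hmx : PySem.List.max? ((boot.drop hh).take (t + 1 - hh)) (fun x => x) with
    | none =>
      rw [PySem.List.max?_eq_none_iff] at hmx
      rw [hmx] at hwlen
      simp at hwlen; omega
    | some m => exact ⟨m, rfl⟩
  rw [hm]
  have h1 := PySem.List.max?_isMax hm (pvg boot a) hwa
  have h2 := hwub m (PySem.List.max?_mem hm)
  rw [hhead]
  simp only [Option.getD_some]
  omega

-- A's prefix array holds the prefix sums of processingPower
lemma prefix_spec (proc : List Int) (hne : proc ≠ []) :
    (List.range' 1 (proc.length - 1)).foldl
      (fun acc (i : Nat) => acc ++ [acc.getLast?.getD 0 + PySem.List.pyGetD proc (i : Int) 0])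
      [PySem.List.pyGetD proc 0 0]
    = (List.range proc.length).map (fun i => (proc.take (i + 1)).sum) := by
  have hlen : 0 < proc.length := List.length_pos_of_ne_nil hne
  have haux : ∀ k, k ≤ proc.length - 1 →
      (List.range' 1 k).foldl
        (fun acc (i : Nat) => acc ++ [acc.getLast?.getD 0 + PySem.List.pyGetD proc (i : Int) 0])
        [PySem.List.pyGetD proc 0 0]
      = (List.range (k + 1)).map (fun i => (proc.take (i + 1)).sum) := by
    intro k
    induction k with
    | zero =>
      intro _
      rw [List.range'_zero, List.foldl_nil, PySem.List.pyGetD_zero,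
        List.getD_eq_getElem proc 0 hlen]
      have h1 : (proc.take 1).sum = proc[0] := by
        rw [List.sum_take_succ proc 0 hlen]; simp
      rw [show List.range 1 = [0] from List.range_one]
      simp [h1]
    | succ k ih =>
      intro hk
      have hk1 : k + 1 < proc.length := by omega
      rw [List.range'_concat, List.foldl_append, ih (by omega), List.foldl_cons, List.foldl_nil]
      have hlast : ((List.range (k + 1)).map (fun i => (proc.take (i + 1)).sum)).getLast?.getD 0
          = (proc.take (k + 1)).sum := by
        rw [List.range_succ, List.map_append, List.map_cons, List.map_nil, List.getLast?_concat]
        rfl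
      have hgk : PySem.List.pyGetD proc ((1 + 1 * k : Nat) : Int) 0 = proc[k + 1] := by
        rw [PySem.List.pyGetD_natCast, show 1 + 1 * k = k + 1 by omega,
          List.getD_eq_getElem proc 0 hk1]
      rw [hlast, hgk, show List.range (k + 1 + 1) = List.range (k + 1) ++ [k + 1] from List.range_succ,
        List.map_append]
      have hsum : (proc.take (k + 1 + 1)).sum = (proc.take (k + 1)).sum + proc[k + 1] :=
        List.sum_take_succ proc (k + 1) hk1
      simp [hsum]
  have h2 := haux (proc.length - 1) le_rfl
  rw [show proc.length - 1 + 1 = proc.length from by omega] at h2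
  exact h2

-- A's prefix-sum expression equals B's slice sum
lemma sum_spec (proc : List Int) (hh t : Nat) (hht : hh ≤ t) (htl : t < proc.length) :
    (proc.take (t + 1)).sum - (proc.take (hh + 1)).sum + proc.getD hh 0
      = (PySem.List.slice proc (some (hh : Int)) (some ((t : Int) + 1))).sum := by
  have h1 : proc.take (t + 1) = proc.take hh ++ (proc.drop hh).take (t + 1 - hh) := by
    rw [← List.take_add]
    congr 1
    omega
  have h2 : (proc.take (hh + 1)).sum = (proc.take hh).sum + proc[hh]'(by omega) :=
    List.sum_take_succ proc hh (by omega)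
  have h3 : proc.getD hh 0 = proc[hh]'(by omega) := List.getD_eq_getElem proc 0 (by omega)
  rw [show ((t : Int) + 1) = ((t + 1 : Nat) : Int) by push_cast; ring, PySem.List.slice_natCast,
    h3, h2, h1, List.sum_append]
  ring


-- proof-side names for the two loop bodies
def pvPref (proc : List Int) : List Int :=
  (List.range proc.length).map (fun i => (proc.take (i + 1)).sum)

def pvStepA (boot proc : List Int) (pm : Int) (s : Int × Nat × List Nat) (tt : Nat) : Int × Nat × List Nat :=
  if PySem.List.pyGetD boot (Int.ofNat (((((s.2.2.dropWhile (fun j => j < s.2.1)).reverse.dropWhile (fun (j : Nat) =>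
        PySem.List.pyGetD boot (j : Int) 0 ≤ PySem.List.pyGetD boot (tt : Int) 0)).reverse) ++ [tt]).headD 0)) 0 +
       (PySem.List.pyGetD (pvPref proc) (tt : Int) 0 - PySem.List.pyGetD (pvPref proc) (s.2.1 : Int) 0 +
         PySem.List.pyGetD proc (s.2.1 : Int) 0) * ((tt : Int) - s.2.1 + 1) ≤ pm
  then (max s.1 ((tt : Int) - s.2.1 + 1), s.2.1,
        (((s.2.2.dropWhile (fun j => j < s.2.1)).reverse.dropWhile (fun (j : Nat) =>
          PySem.List.pyGetD boot (j : Int) 0 ≤ PySem.List.pyGetD boot (tt : Int) 0)).reverse) ++ [tt])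
  else (s.1, s.2.1 + 1,
        (((s.2.2.dropWhile (fun j => j < s.2.1)).reverse.dropWhile (fun (j : Nat) =>
          PySem.List.pyGetD boot (j : Int) 0 ≤ PySem.List.pyGetD boot (tt : Int) 0)).reverse) ++ [tt])

def pvStepB (boot proc : List Int) (pm : Int) (s : Int × Nat) (tt : Nat) : Int × Nat :=
  if (PySem.List.max? (PySem.List.slice boot (some (s.2 : Int)) (some ((tt : Int) + 1))) (fun x => x)).getD 0 +
       (PySem.List.slice proc (some (s.2 : Int)) (some ((tt : Int) + 1))).sum * ((tt : Int) - s.2 + 1) ≤ pm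
  then (max s.1 ((tt : Int) - s.2 + 1), s.2)
  else (s.1, s.2 + 1)

lemma portA_eq (boot proc : List Int) (pm : Int) (hne : proc ≠ []) :
    findMaximumSustainableClusterSize boot proc pm
      = ((List.range boot.length).foldl (pvStepA boot proc pm) (0, 0, [])).1 := by
  unfold findMaximumSustainableClusterSize
  rw [prefix_spec proc hne]
  rfl

lemma portB_eq (boot proc : List Int) (pm : Int) :
    findMaximumSustainableClusterSize_alt boot proc pm
      = ((List.range boot.length).foldl (pvStepB boot proc pm) (0, 0)).1 := rfl

-- the two loop conditions agree when the deque is pvG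
lemma cond_iff (boot proc : List Int) (pm : Int) (hh t : Nat) (hht : hh ≤ t)
    (htb : t < boot.length) (htp : t < proc.length) :
    (PySem.List.pyGetD boot (Int.ofNat ((pvG boot hh (t + 1)).headD 0)) 0 +
       (PySem.List.pyGetD (pvPref proc) (t : Int) 0 - PySem.List.pyGetD (pvPref proc) (hh : Int) 0 +
         PySem.List.pyGetD proc (hh : Int) 0) * ((t : Int) - hh + 1) ≤ pm)
    ↔ ((PySem.List.max? (PySem.List.slice boot (some (hh : Int)) (some ((t : Int) + 1))) (fun x => x)).getD 0 +
       (PySem.List.slice proc (some (hh : Int)) (some ((t : Int) + 1))).sum * ((t : Int) - hh + 1) ≤ pm) := by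
  have e1 : PySem.List.pyGetD boot (Int.ofNat ((pvG boot hh (t + 1)).headD 0)) 0
      = pvg boot ((pvG boot hh (t + 1)).headD 0) := by
    simp [pvg]
  have e2 : PySem.List.pyGetD (pvPref proc) (t : Int) 0 = (proc.take (t + 1)).sum := by
    rw [PySem.List.pyGetD_natCast]
    exact PySem.List.getD_map_range _ _ _ _ htp
  have e3 : PySem.List.pyGetD (pvPref proc) (hh : Int) 0 = (proc.take (hh + 1)).sum := by
    rw [PySem.List.pyGetD_natCast]
    exact PySem.List.getD_map_range _ _ _ _ (by omega)
  have e4 : PySem.List.pyGetD proc (hh : Int) 0 = proc.getD hh 0 := PySem.List.pyGetD_natCast ..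
  rw [e1, pvG_head_max boot hh t hht htb, e2, e3, e4]
  rw [show (proc.take (t + 1)).sum - (proc.take (hh + 1)).sum + proc.getD hh 0
      = (PySem.List.slice proc (some (hh : Int)) (some ((t : Int) + 1))).sum
    from sum_spec proc hh t hht htp]

-- the loop invariant: equal res and head pointer; A's deque is pvG for some earlier head
lemma loop_inv (boot proc : List Int) (pm : Int) (hlen : boot.length ≤ proc.length) :
    ∀ t, t ≤ boot.length →
      ((List.range t).foldl (pvStepA boot proc pm) (0, 0, [])).1
          = ((List.range t).foldl (pvStepB boot proc pm) (0, 0)).1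
      ∧ ((List.range t).foldl (pvStepA boot proc pm) (0, 0, [])).2.1
          = ((List.range t).foldl (pvStepB boot proc pm) (0, 0)).2
      ∧ ((List.range t).foldl (pvStepA boot proc pm) (0, 0, [])).2.1 ≤ t
      ∧ ∃ h0, h0 ≤ ((List.range t).foldl (pvStepA boot proc pm) (0, 0, [])).2.1
          ∧ ((List.range t).foldl (pvStepA boot proc pm) (0, 0, [])).2.2 = pvG boot h0 t := by
  intro t
  induction t with
  | zero =>
    intro _
    refine ⟨rfl, rfl, le_refl 0, 0, le_refl 0, ?_⟩
    simp [pvG]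
  | succ t ih =>
    intro ht
    obtain ⟨e1, e2, hle, h0, hh0, eqq⟩ := ih (by omega)
    have htb : t < boot.length := by omega
    have htp : t < proc.length := by omega
    simp only [List.range_succ, List.foldl_append, List.foldl_cons, List.foldl_nil]
    set sA := (List.range t).foldl (pvStepA boot proc pm) ((0 : Int), (0 : Nat), ([] : List Nat)) with hsA
    set sB := (List.range t).foldl (pvStepB boot proc pm) ((0 : Int), (0 : Nat)) with hsB
    -- the deque after maintenance
    have hq : (((sA.2.2.dropWhile (fun j => j < sA.2.1)).reverse.dropWhile (fun (j : Nat) =>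
          PySem.List.pyGetD boot (j : Int) 0 ≤ PySem.List.pyGetD boot (t : Int) 0)).reverse) ++ [t]
        = pvG boot sA.2.1 (t + 1) := by
      rw [eqq, pvG_dropWhile boot h0 sA.2.1 t hh0]
      have hpred : (fun (j : Nat) => decide (PySem.List.pyGetD boot (j : Int) 0 ≤ PySem.List.pyGetD boot (t : Int) 0))
          = (fun j => decide (pvg boot j ≤ pvg boot t)) := by
        funext j
        simp [pvg]
      rw [hpred]
      exact pvG_step boot sA.2.1 t hle
    have hstepA : pvStepA boot proc pm sA t
        = if (PySem.List.max? (PySem.List.slice boot (some (sA.2.1 : Int)) (some ((t : Int) + 1))) (fun x => x)).getD 0 +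
             (PySem.List.slice proc (some (sA.2.1 : Int)) (some ((t : Int) + 1))).sum * ((t : Int) - sA.2.1 + 1) ≤ pm
          then (max sA.1 ((t : Int) - sA.2.1 + 1), sA.2.1, pvG boot sA.2.1 (t + 1))
          else (sA.1, sA.2.1 + 1, pvG boot sA.2.1 (t + 1)) := by
      unfold pvStepA
      rw [hq]
      exact if_congr (cond_iff boot proc pm sA.2.1 t hle htb htp) rfl rfl
    have hstepB : pvStepB boot proc pm sB t
        = if (PySem.List.max? (PySem.List.slice boot (some (sB.2 : Int)) (some ((t : Int) + 1))) (fun x => x)).getD 0 +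
             (PySem.List.slice proc (some (sB.2 : Int)) (some ((t : Int) + 1))).sum * ((t : Int) - sB.2 + 1) ≤ pm
          then (max sB.1 ((t : Int) - sB.2 + 1), sB.2)
          else (sB.1, sB.2 + 1) := rfl
    rw [hstepA, hstepB, ← e2, ← e1]
    by_cases hC : (PySem.List.max? (PySem.List.slice boot (some (sA.2.1 : Int)) (some ((t : Int) + 1))) (fun x => x)).getD 0 +
        (PySem.List.slice proc (some (sA.2.1 : Int)) (some ((t : Int) + 1))).sum * ((t : Int) - sA.2.1 + 1) ≤ pm
    · rw [if_pos hC, if_pos hC]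
      refine ⟨rfl, rfl, ?_, sA.2.1, ?_, rfl⟩
      · show sA.2.1 ≤ t + 1
        omega
      · show sA.2.1 ≤ sA.2.1
        exact le_rfl
    · rw [if_neg hC, if_neg hC]
      refine ⟨rfl, rfl, ?_, sA.2.1, ?_, rfl⟩
      · show sA.2.1 + 1 ≤ t + 1
        omega
      · show sA.2.1 ≤ sA.2.1 + 1
        omega

-- ===== VERDICT (by name: the statement is the Claim_ definition above) =====
theorem findMaximumSustainableClusterSize_spec : Claim_equal_findMaximumSustainableClusterSize := by
  unfold Claim_equal_findMaximumSustainableClusterSize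
  intro boot proc pm _ hpre
  unfold Pre_findMaximumSustainableClusterSize at hpre
  obtain ⟨hne, hlen⟩ := hpre
  unfold Spec_findMaximumSustainableClusterSize
  rw [portA_eq boot proc pm hne, portB_eq boot proc pm]
  exact (loop_inv boot proc pm hlen boot.length le_rfl).1
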